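-- pv_equiv track=rewrite | github.com/f2hodge/danger_room | b_Medium/3_longestSubstringWithoutRepeatingCharacters/lenomatic.py | compsubs
-- ===== SOURCE A (Python) =====
-- def compsubs(s): # The first test of algorithms parsing out substrings
--     subs = set()
--     chars = []
--
--     for i in s:
--         if i not in chars:
--             chars.append(i)
--         elif i in chars:
--             chars = chars[(chars.index(i) + 1):]
--             chars.append(i)
--         else:
--             chars = chars[1:]
--             chars.append(i)
--
--         q = "".join(chars)
--         subs.add(q)
--
--     return subs
-- ===== SOURCE B (Python) =====
-- def compsubs(s):
--     # Brute force per end index: recompute each maximal duplicate-free suffix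
--     # independently by a backward scan, instead of maintaining a running buffer.
--     subs = set()
--     for i in range(len(s)):
--         w = []
--         for c in reversed(s[:i + 1]):
--             if c in w:
--                 break
--             w.append(c)
--         subs.add("".join(reversed(w)))
--     return subs
-- ===== Notes on version B (the rewrite author's own statement) =====
-- stated objective: alternative
-- what changed: Replaced the single pass that maintains and splices a running character buffer by a stateless brute force: for each end index, an independent backward scan over s[:i+1] recollects the maximal duplicate-free suffix from scratch (nothing is carried between iterations).
import Mathlib
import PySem

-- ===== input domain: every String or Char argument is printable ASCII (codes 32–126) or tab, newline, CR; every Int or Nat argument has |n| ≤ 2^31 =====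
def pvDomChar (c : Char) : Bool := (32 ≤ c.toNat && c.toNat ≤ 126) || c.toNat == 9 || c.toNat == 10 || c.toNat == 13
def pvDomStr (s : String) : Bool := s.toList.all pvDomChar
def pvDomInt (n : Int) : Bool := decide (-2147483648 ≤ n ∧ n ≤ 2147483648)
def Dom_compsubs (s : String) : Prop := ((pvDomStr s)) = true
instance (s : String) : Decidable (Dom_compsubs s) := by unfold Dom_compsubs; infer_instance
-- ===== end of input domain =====

-- B drops A's incrementally maintained, spliced buffer: for each end index it recomputes the
-- maximal duplicate-free suffix from scratch by an independent backward scan (alternative; no state across iterations).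

-- ===== PORT A =====
-- Python iterates the string yielding 1-char strings; 'chars' is ported as List Char and "".join(chars) as String.ofList.
def compsubsStep (chars : List Char) (c : Char) : List Char :=
  if ¬ (c ∈ chars) then chars ++ [c]
  else if c ∈ chars then
    -- chars.index(c): this branch guarantees c ∈ chars, so index? is some and the getD default is never used
    PySem.List.slice chars (some (((PySem.List.index? chars c).getD 0 : Int) + 1)) none ++ [c]
  else PySem.List.slice chars (some 1) none ++ [c]

def compsubsLoopA : List Char → List Char → List String → List String
  | [], _, subs => subs
  | c :: rest, chars, subs =>
    let chars' := compsubsStep chars c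
    compsubsLoopA rest chars' (PySem.Set.add subs (String.ofList chars'))

def compsubs (s : String) : List String := compsubsLoopA s.toList [] []

-- ===== PORT B =====
-- inner loop: 'for c in reversed(s[:i+1]): if c in w: break; w.append(c)'
def backScan : List Char → List Char → List Char
  | [], w => w
  | c :: rest, w => if c ∈ w then w else backScan rest (w ++ [c])

-- outer loop: 'for i in range(len(s)): … subs.add("".join(reversed(w)))'
def compsubsLoopB (s : String) : List Int → List String → List String
  | [], subs => subs
  | i :: rest, subs =>
    let w := backScan (PySem.Str.slice s none (some (i + 1))).toList.reverse []
    compsubsLoopB s rest (PySem.Set.add subs (String.ofList w.reverse))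

def compsubs_alt (s : String) : List String :=
  compsubsLoopB s (PySem.List.pyRange 0 (PySem.Str.len s) 1) []

-- ===== PRECONDITION & SPEC =====
def Spec_compsubs (s : String) (out : List String) : Prop := out = compsubs_alt s
instance (s : String) (out : List String) : Decidable (Spec_compsubs s out) := by unfold Spec_compsubs; infer_instance

-- ===== CLAIM (what is proved, stated in full; the proofs are below) =====
def Claim_equal_compsubs : Prop := ∀ (s : String), Dom_compsubs s → Spec_compsubs s (compsubs s)

-- ===== LEMMAS AND PROOFS =====

-- w is the maximal duplicate-free suffix of p
def isMDS (p w : List Char) : Prop :=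
  w <:+ p ∧ w.Nodup ∧ ∀ q d, p = q ++ d :: w → d ∈ w

-- if u ++ v is duplicate-free but v is maximal in p, u must be empty
theorem mds_absorb (p v t u : List Char) (hp : p = t ++ (u ++ v)) (hnw : (u ++ v).Nodup)
    (hmax : ∀ q d, p = q ++ d :: v → d ∈ v) : u = [] := by
  rcases List.eq_nil_or_concat u with rfl | ⟨q', d, rfl⟩
  · rfl
  · exfalso
    have hp' : p = (t ++ q') ++ d :: v := by simp [hp]
    have hd : d ∈ v := hmax _ _ hp'
    have hnd : (d :: v).Nodup := by
      have : (q' ++ d :: v).Nodup := by simpa using hnw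
      exact this.of_append_right
    exact (List.nodup_cons.mp hnd).1 hd

theorem mds_unique (p w₁ w₂ : List Char) (h₁ : isMDS p w₁) (h₂ : isMDS p w₂) : w₁ = w₂ := by
  obtain ⟨⟨t₁, ht₁⟩, hn₁, hm₁⟩ := h₁
  obtain ⟨⟨t₂, ht₂⟩, hn₂, hm₂⟩ := h₂
  have heq : t₁ ++ w₁ = t₂ ++ w₂ := ht₁.trans ht₂.symm
  rcases List.append_eq_append_iff.mp heq with ⟨u, _, hw⟩ | ⟨u, _, hw⟩
  · -- w₁ = u ++ w₂
    have : u = [] := mds_absorb p w₂ t₁ u (by rw [← ht₁, hw]) (hw ▸ hn₁) hm₂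
    rw [hw, this, List.nil_append]
  · -- w₂ = u ++ w₁
    have : u = [] := mds_absorb p w₁ t₂ u (by rw [← ht₂, hw]) (hw ▸ hn₂) hm₁
    rw [hw, this, List.nil_append]

-- A's buffer update preserves the MDS invariant
theorem stepA (p b : List Char) (c : Char) (h : isMDS p b) : isMDS (p ++ [c]) (compsubsStep b c) := by
  obtain ⟨⟨t, ht⟩, hnd, hmax⟩ := h
  by_cases hc : c ∈ b
  · obtain ⟨k, hk⟩ : ∃ k, PySem.List.index? b c = some k :=
      Option.isSome_iff_exists.mp (Iff.mpr (PySem.List.index?_isSome_iff b c) hc)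
    obtain ⟨b1, b2, hb, hlen, hnotb1⟩ := Iff.mp (PySem.List.index?_eq_some_iff b c k) hk
    have hstep : compsubsStep b c = b2 ++ [c] := by
      unfold compsubsStep
      rw [if_neg (by simpa using hc), if_pos hc, hk, Option.getD_some,
        show ((k : Int) + 1) = ((k + 1 : Nat) : Int) by push_cast; ring,
        PySem.List.slice_from_natCast, hb,
        show b1 ++ c :: b2 = (b1 ++ [c]) ++ b2 by simp,
        List.drop_left' (by simp [hlen])]
    rw [hstep]
    have hcb2 : (c :: b2).Nodup := by
      rw [hb] at hnd; exact hnd.of_append_right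
    refine ⟨⟨t ++ (b1 ++ [c]), ?_⟩, ?_, ?_⟩
    · rw [← ht, hb]; simp
    · rcases List.nodup_cons.mp hcb2 with ⟨hcnot, hb2⟩
      simp [List.nodup_append, hb2]
      intro x hx hxc; exact hcnot (hxc ▸ hx)
    · intro q d hqd
      have h1 : q ++ (d :: b2) ++ [c] = p ++ [c] := by
        rw [hqd]; simp
      have h2 : q ++ d :: b2 = p := by
        have := List.append_inj' h1 rfl
        exact this.1
      have h3 : p = (t ++ b1) ++ c :: b2 := by rw [← ht, hb]; simp
      have h4 := List.append_inj' (h2.trans h3) (by simp)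
      have : d = c := (List.cons.injEq _ _ _ _ ▸ h4.2).1
      simp [this]
  · have hstep : compsubsStep b c = b ++ [c] := by
      unfold compsubsStep; rw [if_pos (by simpa using hc)]
    rw [hstep]
    refine ⟨⟨t, by rw [← List.append_assoc, ht]⟩, ?_, ?_⟩
    · simp [List.nodup_append, hnd]
      intro x hx hxc; exact hc (hxc ▸ hx)
    · intro q d hqd
      have h1 : q ++ (d :: b) ++ [c] = p ++ [c] := by rw [hqd]; simp
      have h2 : q ++ d :: b = p := (List.append_inj' h1 rfl).1
      exact List.mem_append_left _ (hmax q d h2.symm)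

-- the backward scan collects the maximal duplicate-free prefix of its input
theorem backScan_spec : ∀ (l w : List Char), ∃ r, backScan l w = w ++ r ∧ r <+: l ∧
    (w.Nodup → (w ++ r).Nodup) ∧ (∀ d t, l = r ++ d :: t → d ∈ w ++ r) := by
  intro l
  induction l with
  | nil =>
    intro w
    exact ⟨[], by simp [backScan], by simp, by simp, by intro d t h; simp at h⟩
  | cons c rest ih =>
    intro w
    by_cases hc : c ∈ w
    · refine ⟨[], by simp [backScan, hc], by simp, by simp, ?_⟩
      intro d t h
      obtain ⟨rfl, -⟩ : c = d ∧ rest = t := by simpa using h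
      simpa using hc
    · obtain ⟨r', h1, h2, h3, h4⟩ := ih (w ++ [c])
      refine ⟨c :: r', ?_, ?_, ?_, ?_⟩
      · rw [show backScan (c :: rest) w = backScan rest (w ++ [c]) by simp [backScan, hc], h1]
        simp
      · exact List.cons_prefix_cons.mpr ⟨rfl, h2⟩
      · intro hw
        have : ((w ++ [c]) ++ r').Nodup := h3 (by
          simp [List.nodup_append, hw]
          intro x hx hxc; exact hc (hxc ▸ hx))
        simpa using this
      · intro d t h
        have h' : rest = r' ++ d :: t := by simpa using h
        have := h4 d t h'
        simpa using this

theorem mdsB (p : List Char) : isMDS p (backScan p.reverse []).reverse := by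
  obtain ⟨r, h1, h2, h3, h4⟩ := backScan_spec p.reverse []
  simp only [List.nil_append] at h1 h3 h4
  rw [h1]
  refine ⟨?_, List.nodup_reverse.mpr (h3 List.nodup_nil), ?_⟩
  · obtain ⟨t, ht⟩ := h2
    exact ⟨t.reverse, by rw [← List.reverse_append, ht, List.reverse_reverse]⟩
  · intro q d hqd
    have hrev : p.reverse = r ++ d :: q.reverse := by
      rw [hqd]; simp
    exact List.mem_reverse.mpr (h4 d q.reverse hrev)

theorem loopA_cons (c : Char) (rest chars : List Char) (subs : List String) :
    compsubsLoopA (c :: rest) chars subs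
      = compsubsLoopA rest (compsubsStep chars c)
          (PySem.Set.add subs (String.ofList (compsubsStep chars c))) := by
  simp only [compsubsLoopA]

theorem loopB_cons (s : String) (i : Int) (rest : List Int) (subs : List String) :
    compsubsLoopB s (i :: rest) subs
      = compsubsLoopB s rest (PySem.Set.add subs
          (String.ofList (backScan (PySem.Str.slice s none (some (i + 1))).toList.reverse []).reverse)) := by
  simp only [compsubsLoopB]

theorem loop_eq (s : String) : ∀ (l p b : List Char) (subs : List String),
    s.toList = p ++ l → isMDS p b →
    compsubsLoopA l b subs
      = compsubsLoopB s (PySem.List.pyRange (p.length : Int) ((p.length : Int) + l.length) 1) subs := by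
  intro l
  induction l with
  | nil =>
    intro p b subs _ _
    rw [show ((p.length : Int) + ([] : List Char).length) = (p.length : Int) by simp,
      PySem.List.pyRange_one_eq_nil le_rfl]
    rfl
  | cons c rest ih =>
    intro p b subs hsl hmds
    have hlt : (p.length : Int) < (p.length : Int) + (c :: rest).length := by
      simp only [List.length_cons]; push_cast; omega
    have hslice : (PySem.Str.slice s none (some ((p.length : Int) + 1))).toList = p ++ [c] := by
      rw [show ((p.length : Int) + 1) = ((p.length + 1 : Nat) : Int) by push_cast; ring,
        PySem.Str.toList_slice, PySem.Chars.slice_eq_listSlice, PySem.List.slice_to_natCast, hsl,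
        show p ++ c :: rest = (p ++ [c]) ++ rest by simp,
        List.take_left' (by simp)]
    have hw : (backScan (PySem.Str.slice s none (some ((p.length : Int) + 1))).toList.reverse []).reverse
        = compsubsStep b c := by
      rw [hslice]
      exact mds_unique (p ++ [c]) _ _ (mdsB (p ++ [c])) (stepA p b c hmds)
    have h1 : ((p.length : Int) + 1) = (((p ++ [c]).length : Nat) : Int) := by
      simp
    have h2 : ((p.length : Int) + (((c :: rest).length : Nat) : Int))
        = ((((p ++ [c]).length : Nat) : Int) + rest.length) := by
      simp; omega
    rw [PySem.List.pyRange_one_cons hlt, loopA_cons, loopB_cons, hw, h1, h2]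
    exact ih (p ++ [c]) (compsubsStep b c) _ (by rw [hsl]; simp) (stepA p b c hmds)

-- ===== VERDICT (by name: the statement is the Claim_ definition above) =====
theorem compsubs_spec : Claim_equal_compsubs := by
  intro s _
  unfold Spec_compsubs compsubs compsubs_alt
  have hmds0 : isMDS [] [] :=
    ⟨⟨[], rfl⟩, List.nodup_nil, by intro q d h; exact absurd h (by simp)⟩
  have h := loop_eq s s.toList [] [] [] (by simp) hmds0
  simpa using h
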